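-- pv_equiv track=rewrite | github.com/annachemerisbvg4-stack/GopiAI | rag_cleanup_backup_20250620_015458/project_health/analyzers/mark_dead_code.py | should_process_file
-- ===== SOURCE A (Python) =====
-- def should_process_file(file_path: str, good_files: set) -> bool:
--     """Проверяет, следует ли обрабатывать данный файл"""
--     # Нормализуем путь для сравнения
--     normalized_path = file_path.replace('\\', '/')
--
--     # Проверяем прямое совпадение
--     if normalized_path in good_files:
--         return False
--
--     # Проверяем частичное совпадение
--     for good_file in good_files:
--         if normalized_path.endswith(good_file):
--             return False
--
--     return True
-- ===== SOURCE B (Python) =====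
-- def should_process_file(file_path: str, good_files: set) -> bool:
--     """Check whether file_path should be processed: True unless some good_file
--     is a suffix of the normalized path (or equals it)."""
--     normalized_path = file_path.replace('\\', '/')
--     gs = set(good_files)
--     # look up only one candidate suffix per distinct good_file length,
--     # instead of scanning every good_file with endswith
--     for length in {len(g) for g in gs}:
--         if length <= len(normalized_path) and normalized_path[len(normalized_path) - length:] in gs:
--             return False
--     return True
-- ===== Notes on version B (the rewrite author's own statement) =====
-- stated objective: alternative
-- what changed: Reversed the traversal: B indexes good_files as a hash set plus the set of their distinct lengths, and tests one candidate suffix of the normalized path per distinct length with an O(1) set lookup, replacing A's direct-membership guard and per-good_file endswith scan.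
import Mathlib
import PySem

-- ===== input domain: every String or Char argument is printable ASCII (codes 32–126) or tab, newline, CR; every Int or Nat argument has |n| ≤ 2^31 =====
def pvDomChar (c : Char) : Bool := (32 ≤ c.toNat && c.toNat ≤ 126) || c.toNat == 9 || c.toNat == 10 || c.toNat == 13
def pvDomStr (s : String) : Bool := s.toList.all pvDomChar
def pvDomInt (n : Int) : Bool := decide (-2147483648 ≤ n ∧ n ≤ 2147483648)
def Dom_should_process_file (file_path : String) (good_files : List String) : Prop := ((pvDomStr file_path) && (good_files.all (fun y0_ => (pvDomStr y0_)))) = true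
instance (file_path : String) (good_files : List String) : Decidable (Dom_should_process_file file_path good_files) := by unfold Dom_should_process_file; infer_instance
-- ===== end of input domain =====

-- ===== PORT A =====
-- B reverses the traversal (enumerate path suffixes against set(good_files) instead of
-- scanning good_files with endswith); objective: alternative, same exact result.
-- normalized = file_path.replace('\\', '/'); direct-membership check, then a scan of
-- good_files with endswith ('for … return False' ported as List.any).
def should_process_file (file_path : String) (good_files : List String) : Bool :=
  let normalized_path := PySem.Str.replace file_path "\\" "/"
  if good_files.contains normalized_path then false
  else if good_files.any (fun good_file => PySem.Str.endswith normalized_path good_file) then false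
  else true

-- ===== PORT B =====
-- B: gs = set(good_files); for each distinct good_file length L (a set, consumed
-- order-independently by an any), test the single length-L suffix of the normalized
-- path against gs (p[len(p)-L:] with 0 ≤ len(p)-L is exactly List.drop (len-L)).
def should_process_file_alt (file_path : String) (good_files : List String) : Bool :=
  let cs := (PySem.Str.replace file_path "\\" "/").toList
  let gs := PySem.Set.ofList good_files
  let lens := PySem.Set.ofList (gs.map (fun g => g.toList.length))
  !(lens.any (fun L => decide (L ≤ cs.length) &&
      PySem.Set.contains gs (String.ofList (cs.drop (cs.length - L)))))

-- ===== PRECONDITION & SPEC =====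
def Spec_should_process_file (file_path : String) (good_files : List String) (out : Bool) : Prop := out = should_process_file_alt file_path good_files
instance (file_path : String) (good_files : List String) (out : Bool) : Decidable (Spec_should_process_file file_path good_files out) := by unfold Spec_should_process_file; infer_instance

-- ===== CLAIM (what is proved, stated in full; the proofs are below) =====
def Claim_equal_should_process_file : Prop := ∀ (file_path : String) (good_files : List String), Dom_should_process_file file_path good_files → Spec_should_process_file file_path good_files (should_process_file file_path good_files)

-- ===== LEMMAS AND PROOFS =====

-- key characterisation: some good_file is a suffix of the path ↔ for some distinct
-- good_file length L ≤ |path|, the length-L suffix of the path is a good_file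
lemma suffix_scan_eq (cs : List Char) (gs : List String) :
    (gs.contains (String.ofList cs) || gs.any (fun g => PySem.Chars.endswith cs g.toList))
      = (PySem.Set.ofList ((PySem.Set.ofList gs).map (fun g => g.toList.length))).any
          (fun L => decide (L ≤ cs.length) &&
            PySem.Set.contains (PySem.Set.ofList gs) (String.ofList (cs.drop (cs.length - L)))) := by
  apply Bool.eq_iff_iff.mpr
  simp only [List.contains_iff_mem, List.any_eq_true, PySem.Chars.endswith_iff,
    Bool.or_eq_true, Bool.and_eq_true, decide_eq_true_eq, PySem.Set.contains,
    PySem.Set.mem_ofList, List.mem_map]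
  constructor
  · rintro (h | ⟨g, hg, t, ht⟩)
    · -- direct membership is the L = |cs| lookup
      refine ⟨cs.length, ⟨String.ofList cs, h, by simp⟩, le_refl _, ?_⟩
      simpa using h
    · have hlen : t.length + g.toList.length = cs.length := by
        rw [← ht]; simp
      have hdrop : cs.drop (cs.length - g.toList.length) = g.toList := by
        have : cs.length - g.toList.length = t.length := by omega
        rw [this, ← ht]; simp
      refine ⟨g.toList.length, ⟨g, hg, rfl⟩, by omega, ?_⟩
      rw [hdrop]
      simpa using hg
  · rintro ⟨L, _, _, hmem⟩
    right
    exact ⟨String.ofList (cs.drop (cs.length - L)), hmem,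
      by simpa using List.drop_suffix (cs.length - L) cs⟩

-- ===== VERDICT (by name: the statement is the Claim_ definition above) =====
theorem should_process_file_spec : Claim_equal_should_process_file := by
  intro file_path good_files _
  unfold Spec_should_process_file should_process_file should_process_file_alt
  simp only [PySem.Str.endswith_eq]
  have hmk : PySem.Str.replace file_path "\\" "/"
      = String.ofList (PySem.Str.replace file_path "\\" "/").toList := String.ofList_toList.symm
  rw [hmk]
  set cs := (PySem.Str.replace file_path "\\" "/").toList with hcs
  simp only [String.toList_ofList]
  rw [← suffix_scan_eq cs good_files]
  by_cases h1 : good_files.contains (String.ofList cs) <;>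
    by_cases h2 : good_files.any (fun g => PySem.Chars.endswith cs g.toList) <;>
      simp [h2]
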